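-- pv_equiv track=rewrite | github.com/altapicks/OverOwned-Automated | backend/app/services/kalshi.py | _last_name_key
-- ===== SOURCE A (Python) =====
-- def _strip_accents(s: str) -> str:
--     """Normalize unicode for matching: 'Müller' → 'Muller'."""
--     import unicodedata
--     return "".join(
--         c for c in unicodedata.normalize("NFKD", s or "")
--         if not unicodedata.combining(c)
--     )
--
-- def _last_name_key(name: str) -> str:
--     """Extract a normalized last-name matching key from a full or partial name.
--
--     Examples:
--       "Jannik Sinner"       → "sinner"
--       "Sinner"              → "sinner"
--       "Müller-Schär"        → "muller-schar"   (keep hyphen, strip accents)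
--       "Van de Zandschulp"   → "zandschulp"     (drop lowercase particles)
--       "De Minaur"           → "minaur"         (drop 'de')
--     """
--     if not name:
--         return ""
--     cleaned = _strip_accents(name).strip().lower()
--     # Drop common surname particles before taking the last token
--     parts = [
--         p for p in cleaned.split()
--         if p not in {"de", "van", "der", "den", "da", "di", "du", "le", "la", "el", "al", "del"}
--     ]
--     if not parts:
--         return cleaned
--     # The last token is the last name
--     return parts[-1]
-- ===== SOURCE B (Python) =====
-- def _strip_accents(s: str) -> str:
--     """Normalize unicode for matching: 'Müller' → 'Muller'."""
--     import unicodedata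
--     return "".join(
--         c for c in unicodedata.normalize("NFKD", s or "")
--         if not unicodedata.combining(c)
--     )
--
-- _PARTICLES = {"de", "van", "der", "den", "da", "di", "du", "le", "la", "el", "al", "del"}
--
-- def _last_name_key(name: str) -> str:
--     if not name:
--         return ""
--     cleaned = _strip_accents(name).strip().lower()
--     # Single character-level scan from the right: build the current token by
--     # prepending characters; whenever a whitespace boundary completes a token,
--     # return it if it is not a particle, else discard it and keep scanning.
--     # No split() call and no intermediate token list.
--     w = ""
--     for c in reversed(cleaned):
--         if c.isspace():
--             if w:
--                 if w not in _PARTICLES: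
--                     return w
--                 w = ""
--         else:
--             w = c + w
--     if w:
--         if w not in _PARTICLES:
--             return w
--     return cleaned
-- ===== Notes on version B (the rewrite author's own statement) =====
-- stated objective: alternative
-- what changed: Replaces split() + filtered-list comprehension + parts[-1] by a single character-level right-to-left scan that tokenizes manually (prepending chars into the current token) and returns the first completed non-particle token, falling back to the cleaned string; no split and no intermediate list of tokens.
import Mathlib
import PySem

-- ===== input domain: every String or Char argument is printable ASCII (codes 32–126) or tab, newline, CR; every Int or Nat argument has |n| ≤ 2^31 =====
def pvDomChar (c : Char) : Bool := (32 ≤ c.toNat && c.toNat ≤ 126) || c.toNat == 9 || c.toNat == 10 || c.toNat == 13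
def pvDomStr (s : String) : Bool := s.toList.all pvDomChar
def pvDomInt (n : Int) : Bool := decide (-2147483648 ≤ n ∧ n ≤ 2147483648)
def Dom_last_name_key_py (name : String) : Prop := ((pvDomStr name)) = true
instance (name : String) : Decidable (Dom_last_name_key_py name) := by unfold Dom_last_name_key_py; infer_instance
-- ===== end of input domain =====

-- B replaces A's split()+filter+parts[-1] by one character-level right-to-left scan that
-- tokenizes manually and returns the first completed non-particle token (alternative decomposition).

-- ===== PORT A =====
-- _strip_accents: NFKD normalization and combining-mark removal are the identity on the
-- printable-ASCII (plus tab/newline/CR) domain, so this hand port is exact there.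
def strip_accents_py (s : String) : String := s

def pvParticles : List String :=
  ["de", "van", "der", "den", "da", "di", "du", "le", "la", "el", "al", "del"]

def last_name_key_py (name : String) : String :=
  if name = "" then ""
  else
    let cleaned := PySem.Str.lower (PySem.Str.strip (strip_accents_py name))
    let parts := (PySem.Str.split₀ cleaned).filter (fun p => !(pvParticles.contains p))
    if parts.isEmpty then cleaned else parts.getLastD ""

-- ===== PORT B =====
-- char-level particle set (Source B compares whole tokens; here tokens are char lists)
def pvParticlesC : List (List Char) := pvParticles.map String.toList

-- the right-to-left character scan of Source B: `r` is the not-yet-scanned part of the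
-- reversed cleaned string, `w` the current token built by prepending (as in Source B).
def altScanRev (cleaned : List Char) : List Char → List Char → List Char
  | [], w =>
      if w.isEmpty then cleaned
      else if pvParticlesC.contains w then cleaned
      else w
  | c :: rest, w =>
      if PySem.Chars.isspace c then
        if w.isEmpty then altScanRev cleaned rest []
        else if pvParticlesC.contains w then altScanRev cleaned rest []
        else w
      else altScanRev cleaned rest (c :: w)

def last_name_key_py_alt (name : String) : String :=
  if name = "" then ""
  else
    let cleaned := PySem.Str.lower (PySem.Str.strip (strip_accents_py name))
    String.ofList (altScanRev cleaned.toList cleaned.toList.reverse [])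

-- ===== PRECONDITION & SPEC =====
def Spec_last_name_key_py (name : String) (out : String) : Prop := out = last_name_key_py_alt name
instance (name : String) (out : String) : Decidable (Spec_last_name_key_py name out) := by unfold Spec_last_name_key_py; infer_instance

-- ===== CLAIM (what is proved, stated in full; the proofs are below) =====
def Claim_equal_last_name_key_py : Prop := ∀ (name : String), Dom_last_name_key_py name → Spec_last_name_key_py name (last_name_key_py name)

-- ===== LEMMAS AND PROOFS =====

-- go on a space-free word just accumulates it into cur
theorem go_nospace (w : List Char) (hw : ∀ c ∈ w, PySem.Chars.isspace c = false) :
    ∀ cur acc, PySem.Chars.split₀.go w cur acc = PySem.Chars.split₀.go [] (w.reverse ++ cur) acc := by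
  induction w with
  | nil => intro cur acc; simp
  | cons c rest ih =>
      intro cur acc
      have hc : PySem.Chars.isspace c = false := hw c (List.mem_cons_self ..)
      have hr : ∀ x ∈ rest, PySem.Chars.isspace x = false := fun x hx => hw x (List.mem_cons_of_mem _ hx)
      simp only [PySem.Chars.split₀.go, hc, Bool.false_eq_true, if_false]
      rw [ih hr (c :: cur) acc]
      simp [PySem.Chars.split₀.go]

-- splitting off one space-terminated trailing word
theorem go_append_word (c : Char) (hc : PySem.Chars.isspace c = true)
    (w : List Char) (hw : ∀ x ∈ w, PySem.Chars.isspace x = false) :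
    ∀ (u cur : List Char) (acc : List (List Char)),
      PySem.Chars.split₀.go (u ++ c :: w) cur acc =
        PySem.Chars.split₀.go u cur acc ++ (if w.isEmpty then [] else [w]) := by
  intro u
  induction u with
  | nil =>
      intro cur acc
      simp only [List.nil_append, PySem.Chars.split₀.go, hc, if_true]
      by_cases h : cur.isEmpty
      · rw [h, if_pos rfl, go_nospace w hw [] acc]
        simp only [PySem.Chars.split₀.go, List.append_nil]
        cases hwn : w with
        | nil => simp
        | cons x xs => simp
      · simp only [h, Bool.false_eq_true, if_false]
        rw [go_nospace w hw [] (cur.reverse :: acc)]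
        simp only [PySem.Chars.split₀.go, List.append_nil]
        cases hwn : w with
        | nil => simp [h]
        | cons x xs => simp [h]
  | cons d u' ih =>
      intro cur acc
      simp only [List.cons_append, PySem.Chars.split₀.go]
      by_cases hd : PySem.Chars.isspace d
      · by_cases h : cur.isEmpty <;> simp [hd, h, ih]
      · simp [hd, ih]

-- main loop invariant: the scan equals "last kept token of split₀, else cleaned"
theorem altScanRev_eq (cleaned : List Char) :
    ∀ (r w : List Char), (∀ x ∈ w, PySem.Chars.isspace x = false) →
      altScanRev cleaned r w =
        (((PySem.Chars.split₀ (r.reverse ++ w)).filter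
            (fun p => !(pvParticlesC.contains p))).getLast?).getD cleaned := by
  intro r
  induction r with
  | nil =>
      intro w hw
      simp only [List.reverse_nil, List.nil_append, PySem.Chars.split₀]
      rw [go_nospace w hw [] []]
      simp only [PySem.Chars.split₀.go, List.append_nil]
      cases hwn : w with
      | nil => simp [altScanRev]
      | cons x xs =>
          by_cases hp' : x :: xs ∈ pvParticlesC
          · simp [altScanRev, List.contains_iff_mem, hp']
          · simp [altScanRev, List.contains_iff_mem, hp']
  | cons c r' ih =>
      intro w hw
      by_cases hs : PySem.Chars.isspace c
      · have key : PySem.Chars.split₀ ((c :: r').reverse ++ w) =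
            PySem.Chars.split₀ r'.reverse ++ (if w.isEmpty then [] else [w]) := by
          simp only [List.reverse_cons, List.append_assoc, List.singleton_append,
            PySem.Chars.split₀]
          exact go_append_word c hs w hw r'.reverse [] []
        rw [key, List.filter_append]
        cases hwn : w with
        | nil =>
            simp only [altScanRev, hs, if_true, List.isEmpty_nil]
            rw [ih [] (by simp)]
            simp [PySem.Chars.split₀]
        | cons x xs =>
            simp only [altScanRev, hs, if_true, hwn ▸ (by simp : (x :: xs).isEmpty = false),
              Bool.false_eq_true, if_false, List.isEmpty_cons]
            by_cases hp : pvParticlesC.contains (x :: xs)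
            · have hp' : x :: xs ∈ pvParticlesC := List.contains_iff_mem.mp hp
              simp only [hp, if_true]
              have ih0 := ih [] (by simp)
              rw [List.append_nil] at ih0
              have hf : List.filter (fun p => !pvParticlesC.contains p) [x :: xs] = [] := by
                simp [hp']
              rw [hf, List.append_nil, ih0]
            · have hp' : x :: xs ∉ pvParticlesC := fun h => hp (List.contains_iff_mem.mpr h)
              have hf : List.filter (fun p => !pvParticlesC.contains p) [x :: xs] = [x :: xs] := by
                simp [hp']
              rw [hf, List.getLast?_concat]
              simp [hp']
      · have key : (c :: r').reverse ++ w = r'.reverse ++ (c :: w) := by simp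
        simp only [altScanRev, hs, Bool.false_eq_true, if_false, key]
        exact ih (c :: w) (by
          intro x hx
          rcases List.mem_cons.mp hx with h | h
          · exact h ▸ hs |> fun h' => by simpa using congrArg (fun b => b) (eq_false_of_ne_true h')
          · exact hw x h)

-- particle membership transfers between String and List Char tokens
theorem particles_contains (w : List Char) :
    pvParticles.contains (String.ofList w) = pvParticlesC.contains w := by
  rw [Bool.eq_iff_iff, List.contains_iff_mem, List.contains_iff_mem]
  constructor
  · intro h
    have := List.mem_map_of_mem (f := String.toList) h
    simpa [pvParticlesC] using this
  · intro h
    rcases List.mem_map.mp (by simpa [pvParticlesC] using h) with ⟨s, hs, hw⟩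
    rwa [← hw, String.ofList_toList]

-- ===== VERDICT (by name: the statement is the Claim_ definition above) =====
theorem last_name_key_py_spec : Claim_equal_last_name_key_py := by
  intro name _
  unfold Spec_last_name_key_py last_name_key_py last_name_key_py_alt
  by_cases hn : name = ""
  · simp [hn]
  · simp only [if_neg hn]
    set cleaned := PySem.Str.lower (PySem.Str.strip (strip_accents_py name)) with hc
    rw [altScanRev_eq cleaned.toList cleaned.toList.reverse [] (by simp)]
    simp only [List.reverse_reverse, List.append_nil]
    have hsplit : PySem.Str.split₀ cleaned = (PySem.Chars.split₀ cleaned.toList).map String.ofList := rfl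
    rw [hsplit, List.filter_map]
    have hpred : ((fun p => !(pvParticles.contains p)) ∘ String.ofList) =
        (fun p => !(pvParticlesC.contains p)) := by
      funext w
      simp only [Function.comp_apply]
      rw [particles_contains]
    rw [hpred]
    set partsC := (PySem.Chars.split₀ cleaned.toList).filter (fun p => !(pvParticlesC.contains p)) with hp
    cases hL : partsC.getLast? with
    | none =>
        have hnil : partsC = [] := by
          cases hpl : partsC with
          | nil => rfl
          | cons x xs => rw [hpl] at hL; simp at hL
        simp [hnil]
    | some b =>
        have hne : partsC ≠ [] := by intro h; rw [h] at hL; simp at hL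
        have hmapne : partsC.map String.ofList ≠ [] := by simpa using hne
        rw [List.getLastD_eq_getLast?, List.getLast?_map, hL]
        simp only [List.isEmpty_iff, List.map_eq_nil_iff, Option.map_some, Option.getD_some]
        rw [if_neg hne]
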